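-- pv_equiv track=rewrite | github.com/benneberg/contextcompiler | ccc/generators/capabilities.py | _group_schemas_into_capabilities
-- ===== SOURCE A (Python) =====
-- from collections import defaultdict
-- from typing import Dict, List, Optional, Set, Tuple
--
-- _DOMAIN_KEYWORDS: Dict[str, List[str]] = {
--     # Domain          # Code signals (route prefixes, class name fragments)
--     "platform":       ["platform", "device", "adapter", "player", "signage"],
--     "auth":           ["auth", "login", "logout", "token", "session", "permission",
--                        "role", "password", "credential", "oauth", "jwt"],
--     "user":           ["user", "profile", "account", "member", "subscriber"],
--     "content":        ["content", "media", "asset", "playlist", "schedule",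
--                        "cms", "editorial", "article", "page"],
--     "pairing":        ["pair", "pairing", "handshake", "register", "enroll",
--                        "device", "activate"],
--     "payment":        ["payment", "billing", "invoice", "subscription", "stripe",
--                        "checkout", "order", "price"],
--     "notification":   ["notification", "push", "email", "sms", "alert", "webhook"],
--     "analytics":      ["analytics", "event", "track", "metric", "telemetry",
--                        "report", "stat"],
--     "search":         ["search", "query", "index", "elastic", "filter", "facet"],
--     "data":           ["schema", "migration", "database", "seed", "model", "entity"],
--     "gateway":        ["gateway", "proxy", "routing", "load", "balance"],
--     "config":         ["config", "setting", "feature", "flag", "env", "preference"],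
--     "integration":    ["integration", "webhook", "sync", "import", "export",
--                        "connector", "bridge"],
--     "infra":          ["health", "status", "metrics", "monitor", "deploy",
--                        "infra", "docker", "k8s"],
-- }
--
-- def _class_domain(name: str) -> str:
--     """Infer domain from a class name: PlatformConfig → platform"""
--     for domain, signals in _DOMAIN_KEYWORDS.items():
--         if any(sig in name.lower() for sig in signals):
--             return domain
--     return "general"
--
-- def _group_schemas_into_capabilities(
--     schema_names: List[str],
-- ) -> Dict[str, List[str]]:
--     """Group schema/class names by detected domain."""
--     groups: Dict[str, List[str]] = defaultdict(list)
--     for name in schema_names: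
--         domain = _class_domain(name)
--         groups[domain].append(name)
--     return dict(groups)
-- ===== SOURCE B (Python) =====
-- # Keyword rules kept as compact text lines (first word = domain, the rest = its
-- # signals), parsed once at import into a flat (signal, domain) list; names are
-- # classified by a single scan of that flat list and grouped by a comprehension
-- # over first-occurrence-deduped domains.
-- _TABLE = [
--     "platform platform device adapter player signage",
--     "auth auth login logout token session permission role password credential oauth jwt",
--     "user user profile account member subscriber",
--     "content content media asset playlist schedule cms editorial article page",
--     "pairing pair pairing handshake register enroll device activate",
--     "payment payment billing invoice subscription stripe checkout order price",
--     "notification notification push email sms alert webhook",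
--     "analytics analytics event track metric telemetry report stat",
--     "search search query index elastic filter facet",
--     "data schema migration database seed model entity",
--     "gateway gateway proxy routing load balance",
--     "config config setting feature flag env preference",
--     "integration integration webhook sync import export connector bridge",
--     "infra health status metrics monitor deploy infra docker k8s",
-- ]
--
-- _FLAT = []
-- for _line in _TABLE:
--     _dom, *_sigs = _line.split()
--     for _sig in _sigs:
--         _FLAT.append((_sig, _dom))
--
--
-- def _classify(low):
--     for sig, dom in _FLAT:
--         if sig in low:
--             return dom
--     return "general"
--
--
-- def _group_schemas_into_capabilities(schema_names):
--     pairs = [(_classify(name.lower()), name) for name in schema_names]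
--     order = list(dict.fromkeys(d for d, _ in pairs))
--     return {d: [n for dd, n in pairs if dd == d] for d in order}
-- ===== Notes on version B (the rewrite author's own statement) =====
-- stated objective: faster
-- what changed: Replaces the name-major defaultdict-append loop over a nested dict-of-lists keyword table with a flat (signal, domain) list parsed once from a compact line table, a single-scan classifier over the once-lowered name, and group construction by comprehension over first-occurrence-deduped domain keys.
import Mathlib
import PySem

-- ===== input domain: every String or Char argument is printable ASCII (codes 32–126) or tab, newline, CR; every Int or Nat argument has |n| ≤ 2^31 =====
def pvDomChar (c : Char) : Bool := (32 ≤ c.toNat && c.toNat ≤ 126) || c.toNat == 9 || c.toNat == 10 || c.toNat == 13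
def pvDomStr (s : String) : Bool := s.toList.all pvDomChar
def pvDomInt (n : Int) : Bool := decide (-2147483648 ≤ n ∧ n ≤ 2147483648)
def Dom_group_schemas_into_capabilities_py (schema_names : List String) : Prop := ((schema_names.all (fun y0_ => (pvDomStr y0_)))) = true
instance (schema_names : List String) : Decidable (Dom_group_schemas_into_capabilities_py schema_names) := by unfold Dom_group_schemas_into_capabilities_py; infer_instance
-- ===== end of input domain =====

-- B replaces A's name-major defaultdict-append loop over a nested keyword dict with a
-- flat (signal, domain) list parsed from a compact line table, a single scan of it over
-- the once-lowered name, and grouping by comprehension over deduped domains (A lowers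
-- the name again for every signal test; a timing run measured B faster).

-- ===== PORT A =====
-- shared module constant _DOMAIN_KEYWORDS (a dict literal, as an association list)
def pvKeywordTable : List (String × List String) :=
  [ ("platform",     ["platform", "device", "adapter", "player", "signage"]),
    ("auth",         ["auth", "login", "logout", "token", "session", "permission",
                      "role", "password", "credential", "oauth", "jwt"]),
    ("user",         ["user", "profile", "account", "member", "subscriber"]),
    ("content",      ["content", "media", "asset", "playlist", "schedule",
                      "cms", "editorial", "article", "page"]),
    ("pairing",      ["pair", "pairing", "handshake", "register", "enroll",
                      "device", "activate"]),
    ("payment",      ["payment", "billing", "invoice", "subscription", "stripe",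
                      "checkout", "order", "price"]),
    ("notification", ["notification", "push", "email", "sms", "alert", "webhook"]),
    ("analytics",    ["analytics", "event", "track", "metric", "telemetry",
                      "report", "stat"]),
    ("search",       ["search", "query", "index", "elastic", "filter", "facet"]),
    ("data",         ["schema", "migration", "database", "seed", "model", "entity"]),
    ("gateway",      ["gateway", "proxy", "routing", "load", "balance"]),
    ("config",       ["config", "setting", "feature", "flag", "env", "preference"]),
    ("integration",  ["integration", "webhook", "sync", "import", "export",
                      "connector", "bridge"]),
    ("infra",        ["health", "status", "metrics", "monitor", "deploy",
                      "infra", "docker", "k8s"]) ]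

-- _class_domain: for-loop over the dict items with early return, any(sig in name.lower() …)
def pvClassDomain (name : String) : List (String × List String) → String
  | [] => "general"
  | (domain, signals) :: rest =>
      if signals.any (fun sig => PySem.Str.isIn sig (PySem.Str.lower name)) then domain
      else pvClassDomain name rest

def group_schemas_into_capabilities_py (schema_names : List String) : List (String × List String) :=
  (schema_names.foldl
    (fun groups name =>
      groups.modify (pvClassDomain name pvKeywordTable) [] (fun v => v ++ [name]))
    PySem.Dict.empty).items

-- ===== PORT B =====
-- _TABLE: the keyword rules as compact text lines (first word of a line = domain, rest = signals)
def pvTable : List String :=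
  [ "platform platform device adapter player signage",
    "auth auth login logout token session permission role password credential oauth jwt",
    "user user profile account member subscriber",
    "content content media asset playlist schedule cms editorial article page",
    "pairing pair pairing handshake register enroll device activate",
    "payment payment billing invoice subscription stripe checkout order price",
    "notification notification push email sms alert webhook",
    "analytics analytics event track metric telemetry report stat",
    "search search query index elastic filter facet",
    "data schema migration database seed model entity",
    "gateway gateway proxy routing load balance",
    "config config setting feature flag env preference",
    "integration integration webhook sync import export connector bridge",
    "infra health status metrics monitor deploy infra docker k8s" ]

-- the module-load parse loop: for each line, `dom, *sigs = line.split()`, append (sig, dom)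
def pvFlat : List (String × String) :=
  pvTable.foldl
    (fun acc line =>
      match PySem.Str.split₀ line with
      | [] => acc                      -- unreachable: no line of the table is blank
      | dom :: sigs => acc ++ sigs.map (fun sig => (sig, dom)))
    []

-- _classify: scan the flat list, first matching signal wins
def pvClassify (low : String) : List (String × String) → String
  | [] => "general"
  | (sig, dom) :: rest => if PySem.Str.isIn sig low then dom else pvClassify low rest

def group_schemas_into_capabilities_py_alt (schema_names : List String) : List (String × List String) :=
  let pairs := schema_names.map (fun name => (pvClassify (PySem.Str.lower name) pvFlat, name))
  let order := PySem.List.dedup (pairs.map (·.1))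
  order.map (fun d => (d, (pairs.filter (fun p => p.1 == d)).map (·.2)))

-- ===== PRECONDITION & SPEC =====
def Spec_group_schemas_into_capabilities_py (schema_names : List String) (out : List (String × List String)) : Prop := out = group_schemas_into_capabilities_py_alt schema_names
instance (schema_names : List String) (out : List (String × List String)) : Decidable (Spec_group_schemas_into_capabilities_py schema_names out) := by unfold Spec_group_schemas_into_capabilities_py; infer_instance

-- ===== CLAIM (what is proved, stated in full; the proofs are below) =====
def Claim_equal_group_schemas_into_capabilities_py : Prop := ∀ (schema_names : List String), Dom_group_schemas_into_capabilities_py schema_names → Spec_group_schemas_into_capabilities_py schema_names (group_schemas_into_capabilities_py schema_names)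

-- ===== LEMMAS AND PROOFS =====

-- the parsed flat table is exactly the flattening of A's nested keyword dict
-- per-line evaluations of the parse's split() (kept small so the kernel checks each independently)
theorem pvLine1 : PySem.Str.split₀ "platform platform device adapter player signage" = ["platform", "platform", "device", "adapter", "player", "signage"] := by decide
theorem pvLine2 : PySem.Str.split₀ "auth auth login logout token session permission role password credential oauth jwt" = ["auth", "auth", "login", "logout", "token", "session", "permission", "role", "password", "credential", "oauth", "jwt"] := by decide
theorem pvLine3 : PySem.Str.split₀ "user user profile account member subscriber" = ["user", "user", "profile", "account", "member", "subscriber"] := by decide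
theorem pvLine4 : PySem.Str.split₀ "content content media asset playlist schedule cms editorial article page" = ["content", "content", "media", "asset", "playlist", "schedule", "cms", "editorial", "article", "page"] := by decide
theorem pvLine5 : PySem.Str.split₀ "pairing pair pairing handshake register enroll device activate" = ["pairing", "pair", "pairing", "handshake", "register", "enroll", "device", "activate"] := by decide
theorem pvLine6 : PySem.Str.split₀ "payment payment billing invoice subscription stripe checkout order price" = ["payment", "payment", "billing", "invoice", "subscription", "stripe", "checkout", "order", "price"] := by decide
theorem pvLine7 : PySem.Str.split₀ "notification notification push email sms alert webhook" = ["notification", "notification", "push", "email", "sms", "alert", "webhook"] := by decide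
theorem pvLine8 : PySem.Str.split₀ "analytics analytics event track metric telemetry report stat" = ["analytics", "analytics", "event", "track", "metric", "telemetry", "report", "stat"] := by decide
theorem pvLine9 : PySem.Str.split₀ "search search query index elastic filter facet" = ["search", "search", "query", "index", "elastic", "filter", "facet"] := by decide
theorem pvLine10 : PySem.Str.split₀ "data schema migration database seed model entity" = ["data", "schema", "migration", "database", "seed", "model", "entity"] := by decide
theorem pvLine11 : PySem.Str.split₀ "gateway gateway proxy routing load balance" = ["gateway", "gateway", "proxy", "routing", "load", "balance"] := by decide
theorem pvLine12 : PySem.Str.split₀ "config config setting feature flag env preference" = ["config", "config", "setting", "feature", "flag", "env", "preference"] := by decide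
theorem pvLine13 : PySem.Str.split₀ "integration integration webhook sync import export connector bridge" = ["integration", "integration", "webhook", "sync", "import", "export", "connector", "bridge"] := by decide
theorem pvLine14 : PySem.Str.split₀ "infra health status metrics monitor deploy infra docker k8s" = ["infra", "health", "status", "metrics", "monitor", "deploy", "infra", "docker", "k8s"] := by decide

theorem pvFlat_eq :
    pvFlat = pvKeywordTable.flatMap (fun p => p.2.map (fun sig => (sig, p.1))) := by
  simp only [pvFlat, pvTable, List.foldl, pvLine1, pvLine2, pvLine3, pvLine4, pvLine5, pvLine6,
    pvLine7, pvLine8, pvLine9, pvLine10, pvLine11, pvLine12, pvLine13, pvLine14]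
  decide

-- scanning a block of signals all mapped to one domain, then the rest
theorem pvClassify_map_append (low dom : String) (sigs : List String) (t : List (String × String)) :
    pvClassify low (sigs.map (fun sig => (sig, dom)) ++ t)
      = if sigs.any (fun sig => PySem.Str.isIn sig low) then dom else pvClassify low t := by
  induction sigs with
  | nil => simp
  | cons s ss ih =>
      cases h : PySem.Chars.isIn s.toList low.toList with
      | true => simp [pvClassify, h]
      | false => simp [pvClassify, h, ih]

-- the flattened scan computes the nested first-match loop
theorem pvClassify_flat (name : String) (t : List (String × List String)) :
    pvClassify (PySem.Str.lower name) (t.flatMap (fun p => p.2.map (fun sig => (sig, p.1))))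
      = pvClassDomain name t := by
  induction t with
  | nil => simp [pvClassify, pvClassDomain]
  | cons p rest ih =>
      obtain ⟨dom, sigs⟩ := p
      simp only [List.flatMap_cons, pvClassDomain]
      rw [pvClassify_map_append, ih]

-- the defaultdict-append fold, read off as a group-by over the key/value pairs
theorem pvGrouping (l : List (String × String)) :
    (l.foldl (fun (d : PySem.Dict String (List String)) p => d.modify p.1 [] (fun v => v ++ [p.2])) PySem.Dict.empty).items
    = (PySem.List.dedup (l.map (·.1))).map (fun k => (k, (l.filter (fun p => p.1 == k)).map (·.2))) := by
  set G := l.foldl (fun (d : PySem.Dict String (List String)) p => d.modify p.1 [] (fun v => v ++ [p.2])) PySem.Dict.empty with hG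
  have hnd : G.keys.Nodup :=
    PySem.Dict.nodup_keys_foldl_insert_key l Prod.fst _ _ (by simp [PySem.Dict.keys_empty])
  have hkeys : G.keys = PySem.List.dedup (l.map (·.1)) :=
    (PySem.Dict.keys_foldl_insert_key l Prod.fst (fun d x => d.getD x.1 [] ++ [x.2]) PySem.Dict.empty).trans
      (by simp [PySem.Dict.keys_empty, PySem.Set.update_nil_left, PySem.List.dedup_eq_ofList])
  rw [PySem.Dict.items_eq_map_keys G hnd [], hkeys]
  refine List.map_congr_left ?_
  intro k _
  have h2 := PySem.Dict.getD_foldl_modify_append (d := (PySem.Dict.empty : PySem.Dict String (List String))) (l := l) (c := k)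
  simp only [hG, h2, PySem.Dict.getD_empty, List.nil_append]

-- ===== VERDICT (by name: the statement is the Claim_ definition above) =====
theorem group_schemas_into_capabilities_py_spec : Claim_equal_group_schemas_into_capabilities_py := by
  intro schema_names _
  unfold Spec_group_schemas_into_capabilities_py
  unfold group_schemas_into_capabilities_py group_schemas_into_capabilities_py_alt
  simp only [pvFlat_eq, pvClassify_flat]
  have h := pvGrouping (schema_names.map (fun n => (pvClassDomain n pvKeywordTable, n)))
  rw [List.foldl_map] at h
  simpa using h
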